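-- pv_equiv track=rewrite | github.com/jazcap53/make_bintrees | make_bintrees.py | parse
-- ===== SOURCE A (Python) =====
-- def parse(A, ix, out):
--     if ix >= len(A):
--         return ''
--     out += '{"value":' + A[ix] + ','  # process root
--     left_ix = ix * 2 + 1
--     if left_ix < len(A):
--         out += '"left":'  # process left child
--         if A[left_ix] == 'x':
--             out += 'null'
--         else:
--             out = parse(A, left_ix, out)
--     else:
--         out += '"left":null'
--     out += ','  # between left child and right child
--     right_ix = ix * 2 + 2
--     if right_ix < len(A):
--         out += '"right":'  # process right child
--         if A[right_ix] == 'x':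
--             out += 'null'
--         else:
--             out = parse(A, right_ix, out)
--     else:
--         out += '"right":null'
--     return out + '}'  # after right child
-- ===== SOURCE B (Python) =====
-- def parse(A, ix, out):
--     if ix >= len(A):
--         return ''
--     return out + _ser(A, ix)
--
--
-- def _ser(A, ix):
--     if 2 * ix + 1 < len(A) and A[2 * ix + 1] != 'x':
--         left = '"left":' + _ser(A, 2 * ix + 1)
--     else:
--         left = '"left":null'
--     if 2 * ix + 2 < len(A) and A[2 * ix + 2] != 'x':
--         right = '"right":' + _ser(A, 2 * ix + 2)
--     else:
--         right = '"right":null'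
--     return '{"value":' + A[ix] + ',' + left + ',' + right + '}'
-- ===== Notes on version B (the rewrite author's own statement) =====
-- stated objective: simpler
-- what changed: Replaced A's accumulator-threading recursion (each call receives and returns the growing output string `out`) by a compositional recursion: a helper returns each subtree's serialization on its own and the pieces are glued with plain concatenation, so `out` is only prepended once at the top.
import Mathlib
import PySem

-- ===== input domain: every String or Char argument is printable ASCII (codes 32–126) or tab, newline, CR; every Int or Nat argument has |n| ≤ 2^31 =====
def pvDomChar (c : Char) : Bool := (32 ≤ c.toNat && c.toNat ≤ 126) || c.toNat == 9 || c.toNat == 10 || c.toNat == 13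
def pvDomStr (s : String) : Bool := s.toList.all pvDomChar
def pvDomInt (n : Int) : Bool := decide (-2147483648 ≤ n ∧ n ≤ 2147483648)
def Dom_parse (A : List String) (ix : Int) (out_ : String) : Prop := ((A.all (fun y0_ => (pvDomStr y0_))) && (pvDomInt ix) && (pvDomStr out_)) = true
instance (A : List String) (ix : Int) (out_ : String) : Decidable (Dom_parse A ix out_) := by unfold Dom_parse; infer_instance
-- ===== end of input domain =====

-- B is simpler: a compositional recursion that returns each subtree's serialization
-- directly instead of threading the accumulator `out` through every call.

-- ===== PORT A =====
-- A's recursion, on a Nat index (Pre_ restricts to ix ≥ 0, where this is Python-exact).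
def parseGo (A : List String) (ix : Nat) (out_ : String) : String :=
  if _h : A.length ≤ ix then "" else
    let out1 := out_ ++ "{\"value\":" ++ A[ix]'(by omega) ++ ","
    let out2 :=
      if hl : 2 * ix + 1 < A.length then
        let outl := out1 ++ "\"left\":"
        if A[2 * ix + 1]'hl == "x" then outl ++ "null"
        else parseGo A (2 * ix + 1) outl
      else out1 ++ "\"left\":null"
    let out3 := out2 ++ ","
    let out4 :=
      if hr : 2 * ix + 2 < A.length then
        let outr := out3 ++ "\"right\":"
        if A[2 * ix + 2]'hr == "x" then outr ++ "null"
        else parseGo A (2 * ix + 2) outr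
      else out3 ++ "\"right\":null"
    out4 ++ "}"
termination_by A.length - ix
decreasing_by all_goals omega

def parse (A : List String) (ix : Int) (out_ : String) : String :=
  parseGo A ix.toNat out_

-- ===== PORT B =====
-- serialization of the subtree rooted at ix (Source B's `_ser`); "" guard is unreachable
-- under Source B's call pattern, only there for totality
def serAlt (A : List String) (ix : Nat) : String :=
  if h : ix < A.length then
    let left :=
      if hl : 2 * ix + 1 < A.length then
        if A[2 * ix + 1]'hl ≠ "x" then "\"left\":" ++ serAlt A (2 * ix + 1)
        else "\"left\":null"
      else "\"left\":null"
    let right :=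
      if hr : 2 * ix + 2 < A.length then
        if A[2 * ix + 2]'hr ≠ "x" then "\"right\":" ++ serAlt A (2 * ix + 2)
        else "\"right\":null"
      else "\"right\":null"
    "{\"value\":" ++ A[ix]'h ++ "," ++ left ++ "," ++ right ++ "}"
  else ""
termination_by A.length - ix
decreasing_by all_goals omega

def parse_alt (A : List String) (ix : Int) (out_ : String) : String :=
  if (A.length : Int) ≤ ix then "" else out_ ++ serAlt A ix.toNat

-- ===== PRECONDITION & SPEC =====
-- Pre_ excludes negative ix: there Python's negative-index wraparound takes over and A
-- raises IndexError or RecursionError on most inputs (B likewise), returning only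
-- accidental wraparound serializations on the rest.
def Pre_parse (A : List String) (ix : Int) (out_ : String) : Prop := 0 ≤ ix
instance (A : List String) (ix : Int) (out_ : String) : Decidable (Pre_parse A ix out_) := by unfold Pre_parse; infer_instance

def pvWitness_parse : List String × Int × String := (["1", "2", "x"], 0, "")

def Spec_parse (A : List String) (ix : Int) (out_ : String) (out : String) : Prop := out = parse_alt A ix out_
instance (A : List String) (ix : Int) (out_ : String) (out : String) : Decidable (Spec_parse A ix out_ out) := by unfold Spec_parse; infer_instance

-- ===== CLAIM (what is proved, stated in full; the proofs are below) =====
def Claim_equal_parse : Prop := ∀ (A : List String) (ix : Int) (out_ : String), Dom_parse A ix out_ → Pre_parse A ix out_ → Spec_parse A ix out_ (parse A ix out_)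

-- ===== LEMMAS AND PROOFS =====

-- the heart: A's accumulator-threading recursion equals "prefix ++ B's subtree string"
theorem parseGo_eq (A : List String) :
    ∀ k ix out_, A.length - ix ≤ k →
      parseGo A ix out_ = if ix < A.length then out_ ++ serAlt A ix else "" := by
  intro k
  induction k with
  | zero =>
    intro ix out_ hk
    have hge : A.length ≤ ix := by omega
    rw [parseGo]
    simp [hge, Nat.not_lt.mpr hge]
  | succ k ih =>
    intro ix out_ hk
    by_cases hix : ix < A.length
    · rw [parseGo, serAlt]
      simp only [Nat.not_le.mpr hix, dite_false, hix, dite_true]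
      by_cases hl : 2 * ix + 1 < A.length
      · by_cases hlx : A[2 * ix + 1]'hl = "x"
        · by_cases hr : 2 * ix + 2 < A.length
          · by_cases hrx : A[2 * ix + 2]'hr = "x"
            · simp [hl, hlx, hr, hrx, String.append_assoc]
            · rw [ih (2 * ix + 2) _ (by omega)]
              simp [hl, hlx, hr, hrx, String.append_assoc]
              simp [← String.append_assoc]
          · simp [hl, hlx, hr, String.append_assoc]
        · rw [ih (2 * ix + 1) _ (by omega)]
          by_cases hr : 2 * ix + 2 < A.length
          · by_cases hrx : A[2 * ix + 2]'hr = "x"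
            · simp [hl, hlx, hr, hrx, String.append_assoc]
              simp [← String.append_assoc]
            · rw [ih (2 * ix + 2) _ (by omega)]
              simp [hl, hlx, hr, hrx, String.append_assoc]
              simp [← String.append_assoc]
          · simp [hl, hlx, hr, String.append_assoc]
            simp [← String.append_assoc]
      · by_cases hr : 2 * ix + 2 < A.length
        · by_cases hrx : A[2 * ix + 2]'hr = "x"
          · simp [hl, hr, hrx, String.append_assoc]
          · rw [ih (2 * ix + 2) _ (by omega)]
            simp [hl, hr, hrx, String.append_assoc]
            simp [← String.append_assoc]
        · simp [hl, hr, String.append_assoc]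
    · rw [parseGo]
      simp [Nat.le_of_not_lt hix, hix]

-- ===== VERDICT (by name: the statement is the Claim_ definition above) =====
theorem parse_spec : Claim_equal_parse := by
  intro A ix out_ _hdom hpre
  unfold Spec_parse parse parse_alt
  rw [parseGo_eq A (A.length - ix.toNat) ix.toNat out_ le_rfl]
  have h0 : (0 : Int) ≤ ix := hpre
  by_cases h : (A.length : Int) ≤ ix
  · have : ¬ ix.toNat < A.length := by omega
    simp [h, this]
  · have : ix.toNat < A.length := by omega
    simp [h, this]
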